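-- pv_equiv track=rewrite | github.com/KaubyOficial/srt-frases | dividir_roteiro.py | remover_separadores_paragrafo
-- ===== SOURCE A (Python) =====
-- def remover_separadores_paragrafo(texto):
--     """Remove linhas que contem apenas * (separador de paragrafo),
--     junto com as linhas em branco que as cercam, sem deixar espacos extras."""
--     # Divide em blocos separados por linhas em branco
--     # e descarta blocos que sao apenas *
--     linhas = texto.split("\n")
--     resultado = []
--     i = 0
--     while i < len(linhas):
--         linha = linhas[i].strip()
--         if linha == "*":
--             # Remove linhas em branco antes (ja no resultado)
--             while resultado and resultado[-1] == "":
--                 resultado.pop()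
--             # Pula linhas em branco depois
--             i += 1
--             while i < len(linhas) and linhas[i].strip() == "":
--                 i += 1
--             # Adiciona uma linha em branco para separar os paragrafos
--             resultado.append("")
--             continue
--         resultado.append(linhas[i])
--         i += 1
--     return "\n".join(resultado).strip()
-- ===== SOURCE B (Python) =====
-- def remover_separadores_paragrafo(texto):
--     """Remove linhas que contem apenas * (separador de paragrafo),
--     junto com as linhas em branco que as cercam, sem deixar espacos extras."""
--     saida = []           # committed lines; never ends with a raw "" line
--     pendentes = 0        # trailing raw-empty ("") lines not yet committed
--     pulando = False      # inside the blank run right after a "*"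
--     for linha in texto.split("\n"):
--         s = linha.strip()
--         if pulando:
--             if s == "":
--                 continue
--             pulando = False
--         if s == "*":
--             pendentes = 1        # drop buffered blanks, keep one separator
--             pulando = True
--         elif linha == "":
--             pendentes += 1
--         else:
--             saida.extend([""] * pendentes)
--             pendentes = 0
--             saida.append(linha)
--     saida.extend([""] * pendentes)
--     return "\n".join(saida).strip()
-- ===== Notes on version B (the rewrite author's own statement) =====
-- stated objective: alternative
-- what changed: Replaces A's while-loop with backtracking pops of trailing empty result lines and an inner index-advancing skip loop by a single forward for-loop state machine that buffers trailing raw-empty lines in a counter and uses a skip flag after a separator line.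
import Mathlib
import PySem

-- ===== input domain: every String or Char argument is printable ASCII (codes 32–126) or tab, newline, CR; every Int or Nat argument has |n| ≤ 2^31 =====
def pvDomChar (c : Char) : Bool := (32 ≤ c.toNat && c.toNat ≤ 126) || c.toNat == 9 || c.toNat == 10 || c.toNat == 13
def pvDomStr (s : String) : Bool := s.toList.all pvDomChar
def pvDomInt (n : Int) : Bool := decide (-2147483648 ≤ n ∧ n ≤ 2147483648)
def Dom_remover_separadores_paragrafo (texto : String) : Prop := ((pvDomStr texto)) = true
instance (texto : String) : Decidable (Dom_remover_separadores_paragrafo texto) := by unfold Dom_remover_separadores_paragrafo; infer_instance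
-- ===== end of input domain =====

-- B replaces A's pop-and-backtrack over the result list by a single forward pass that buffers
-- trailing raw-empty lines in a counter and uses a skip flag after a separator line (objective: alternative).


-- ===== PORT A =====
-- port of the inner `while resultado and resultado[-1] == "": resultado.pop()` loop
def pvDropTrailingEmpty (acc : List String) : List String :=
  (acc.reverse.dropWhile (fun l => l == "")).reverse

-- the `while i < len(linhas)` loop of A; acc = resultado, the inner
-- `while i < len(linhas) and linhas[i].strip() == "": i += 1` loop is the dropWhile
def pvLoopA (acc : List String) (linhas : List String) : List String :=
  match linhas with
  | [] => acc
  | l :: rest =>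
    if PySem.Str.strip l == "*" then
      pvLoopA (pvDropTrailingEmpty acc ++ [""])
              (rest.dropWhile (fun x => PySem.Str.strip x == ""))
    else
      pvLoopA (acc ++ [l]) rest
termination_by linhas.length
decreasing_by
  · have := List.length_dropWhile_le (fun x => PySem.Str.strip x == "") rest
    simp; omega
  · simp

-- texto.split("\n"): split? is `some` because the separator "\n" is non-empty
def pvLines (texto : String) : List String :=
  (PySem.Str.split? texto "\n").getD []

def remover_separadores_paragrafo (texto : String) : String :=
  PySem.Str.strip (PySem.Str.join "\n" (pvLoopA [] (pvLines texto)))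

-- ===== PORT B =====
-- one step of B's `for linha in texto.split("\n")` loop; state = (saida, pendentes, pulando)
def pvStepB (st : List String × Nat × Bool) (linha : String) : List String × Nat × Bool :=
  let s := PySem.Str.strip linha
  if st.2.2 && (s == "") then st
  else if s == "*" then (st.1, 1, true)
  else if linha == "" then (st.1, st.2.1 + 1, false)
  else (st.1 ++ List.replicate st.2.1 "" ++ [linha], 0, false)

def remover_separadores_paragrafo_alt (texto : String) : String :=
  let fin := (pvLines texto).foldl pvStepB ([], 0, false)
  PySem.Str.strip (PySem.Str.join "\n" (fin.1 ++ List.replicate fin.2.1 ""))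

-- ===== PRECONDITION & SPEC =====
def Spec_remover_separadores_paragrafo (texto : String) (out : String) : Prop := out = remover_separadores_paragrafo_alt texto
instance (texto : String) (out : String) : Decidable (Spec_remover_separadores_paragrafo texto out) := by unfold Spec_remover_separadores_paragrafo; infer_instance

-- ===== CLAIM (what is proved, stated in full; the proofs are below) =====
def Claim_equal_remover_separadores_paragrafo : Prop := ∀ (texto : String), Dom_remover_separadores_paragrafo texto → Spec_remover_separadores_paragrafo texto (remover_separadores_paragrafo texto)

-- ===== LEMMAS AND PROOFS =====
-- B's final `saida.extend([""] * pendentes)`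
def pvFinB (st : List String × Nat × Bool) : List String :=
  st.1 ++ List.replicate st.2.1 ""

theorem pvDropTrailingEmpty_eq (saida : List String) (p : Nat)
    (h : saida = [] ∨ saida.getLast? ≠ some "") :
    pvDropTrailingEmpty (saida ++ List.replicate p "") = saida := by
  unfold pvDropTrailingEmpty
  have hrep : ∀ (n : Nat) (l : List String),
      (List.replicate n ("" : String) ++ l).dropWhile (fun x => x == "") =
        l.dropWhile (fun x => x == "") := by
    intro n
    induction n with
    | zero => simp
    | succ k ih => intro l; simp [List.replicate_succ, ih]
  rw [List.reverse_append, List.reverse_replicate, hrep]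
  rcases h with h | h
  · subst h; simp
  · rcases hr : saida.reverse with _ | ⟨a, t⟩
    · simp at hr; subst hr; simp
    · have ha : a ≠ "" := by
        intro hae
        apply h
        rw [← List.head?_reverse, hr, hae]; rfl
      rw [List.dropWhile_cons]
      simp [ha, ← hr]

theorem pvSkipB (lines : List String) (saida : List String) (p : Nat) :
    pvFinB (lines.foldl pvStepB (saida, p, true)) =
      pvFinB ((lines.dropWhile (fun x => PySem.Str.strip x == "")).foldl pvStepB (saida, p, false)) := by
  induction lines generalizing saida p with
  | nil => rfl
  | cons l rest ih =>
    by_cases hb : PySem.Str.strip l = ""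
    · rw [List.dropWhile_cons]
      simp only [hb]
      have hstep : pvStepB (saida, p, true) l = (saida, p, true) := by
        simp [pvStepB, hb]
      simp only [List.foldl_cons, hstep, ih]
      simp
    · rw [List.dropWhile_cons]
      have hsame : pvStepB (saida, p, true) l = pvStepB (saida, p, false) l := by
        simp [pvStepB, hb]
      simp only [List.foldl_cons, hsame]
      simp [hb]

theorem pvMain (acc lines : List String) :
    ∀ (saida : List String) (p : Nat), acc = saida ++ List.replicate p "" →
      (saida = [] ∨ saida.getLast? ≠ some "") →
      pvLoopA acc lines = pvFinB (lines.foldl pvStepB (saida, p, false)) := by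
  fun_induction pvLoopA acc lines with
  | case1 acc => intro saida p hacc hinv; simp [pvFinB, hacc]
  | case2 acc l rest hstar ih =>
    intro saida p hacc hinv
    subst hacc
    rw [pvDropTrailingEmpty_eq saida p hinv] at ih ⊢
    have h1 : saida ++ [""] = saida ++ List.replicate 1 "" := by simp
    rw [ih saida 1 h1 hinv]
    have hstep : pvStepB (saida, p, false) l = (saida, 1, true) := by
      simp [pvStepB, hstar]
    simp only [List.foldl_cons, hstep, pvSkipB]
  | case3 acc l rest hstar ih =>
    intro saida p hacc hinv
    subst hacc
    by_cases hl : l = ""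
    · subst hl
      have hstep : pvStepB (saida, p, false) "" = (saida, p + 1, false) := by
        have : PySem.Str.strip "" ≠ "*" := by decide
        simp [pvStepB, this]
      have h1 : saida ++ List.replicate p "" ++ [""] = saida ++ List.replicate (p + 1) "" := by
        simp [List.replicate_succ']
      rw [ih saida (p + 1) h1 hinv]
      simp only [List.foldl_cons, hstep]
    · have hstep : pvStepB (saida, p, false) l =
          (saida ++ List.replicate p "" ++ [l], 0, false) := by
        simp [pvStepB, hstar, hl]
      have hinv' : (saida ++ List.replicate p "" ++ [l]) = [] ∨
          (saida ++ List.replicate p "" ++ [l]).getLast? ≠ some "" := by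
        right
        simp [hl]
      rw [ih (saida ++ List.replicate p "" ++ [l]) 0 (by simp) hinv']
      simp only [List.foldl_cons, hstep]

-- ===== VERDICT (by name: the statement is the Claim_ definition above) =====
theorem remover_separadores_paragrafo_spec : Claim_equal_remover_separadores_paragrafo := by
  intro texto _
  unfold Spec_remover_separadores_paragrafo remover_separadores_paragrafo remover_separadores_paragrafo_alt
  rw [pvMain [] (pvLines texto) [] 0 (by simp) (Or.inl rfl)]
  rfl
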